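-- pv_equiv track=rewrite | github.com/Metallizer95/contact_wire_application | detectionAlg.py | detectAlg
-- ===== SOURCE A (Python) =====
-- demask = False
--
-- def detectAlg(detectionVector, demask=demask):
--     """Алгоритм обнаружения с линейки. По массиву данных формирует массив центров обнаруженных объектов."""
--     centerObjects = []
--     count = 0
--     LenHalfObj = 12
--     for k, sample in enumerate(detectionVector):
--         if sample:
--             count += 1
--         elif not sample and count:
--             if count <= 25:
--                 centerObjects.append(k - int(count/2))
--             elif count > 25 and demask:
--                 centerObjects.append(int(k - LenHalfObj))
--                 centerObjects.append(int(k - count + LenHalfObj))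
--             else:
--                 # Если объект превышает значение 25 пикселов, а нет режима демаскирования, то объект пропускается
--                 pass
--             count = 0
--     centerObjects.reverse()
--     return centerObjects
-- ===== SOURCE B (Python) =====
-- def detectAlg(detectionVector, demask=False):
--     """Two-pass variant: collect terminated truthy runs, then emit centers back-to-front."""
--     # pass 1: (boundary_index, length) of every maximal truthy run terminated by a falsy element
--     runs = []
--     start = None
--     for i, s in enumerate(detectionVector):
--         if s:
--             if start is None:
--                 start = i
--         elif start is not None:
--             runs.append((i, i - start))
--             start = None
--     # pass 2: emit centers, iterating the runs back-to-front (so no final reverse is needed)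
--     out = []
--     for k, n in reversed(runs):
--         if n <= 25:
--             out.append(k - n // 2)
--         elif demask:
--             out.append(k - n + 12)
--             out.append(k - 12)
--     return out
-- ===== Notes on version B (the rewrite author's own statement) =====
-- stated objective: alternative
-- what changed: Replaces the single stateful scan-with-counter-and-final-reverse by two passes: first collect (boundary,length) pairs of terminated truthy runs, then emit centers while walking the run list back-to-front, so no reverse is needed.
import Mathlib
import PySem

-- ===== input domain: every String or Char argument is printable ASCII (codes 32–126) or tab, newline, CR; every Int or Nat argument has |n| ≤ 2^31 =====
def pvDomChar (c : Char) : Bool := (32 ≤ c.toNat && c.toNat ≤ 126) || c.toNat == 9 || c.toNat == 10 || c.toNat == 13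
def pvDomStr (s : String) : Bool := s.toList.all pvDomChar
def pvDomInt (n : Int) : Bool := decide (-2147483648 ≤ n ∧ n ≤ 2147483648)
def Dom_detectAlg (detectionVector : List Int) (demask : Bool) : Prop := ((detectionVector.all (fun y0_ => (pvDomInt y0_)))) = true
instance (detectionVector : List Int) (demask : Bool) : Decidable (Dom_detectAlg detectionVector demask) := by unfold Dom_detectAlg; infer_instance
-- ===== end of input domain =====

-- B replaces A's single stateful scan (counter + final reverse) by two passes: collect the
-- terminated truthy runs first, then emit centers walking that run list back-to-front.

-- ===== PORT A =====
-- one loop over enumerate(detectionVector), state (count, centerObjects); int(count/2) = truncation = Int.tdiv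
def aLoop (demask : Bool) : List Int → Int → Int → List Int → List Int
  | [], _, _, acc => acc
  | s :: rest, k, count, acc =>
    if s ≠ 0 then aLoop demask rest (k + 1) (count + 1) acc
    else if count ≠ 0 then
      aLoop demask rest (k + 1) 0
        (if count ≤ 25 then acc ++ [k - Int.tdiv count 2]
         else if 25 < count ∧ demask then acc ++ [k - 12, k - count + 12]
         else acc)
    else aLoop demask rest (k + 1) count acc

def detectAlg (detectionVector : List Int) (demask : Bool) : List Int :=
  (aLoop demask detectionVector 0 0 []).reverse

-- ===== PORT B =====
-- pass 1 of Source B: collect (boundary index, length) of each truthy run terminated by a falsy element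
def altRuns : List Int → Int → Option Int → List (Int × Int) → List (Int × Int)
  | [], _, _, runs => runs
  | s :: rest, i, start, runs =>
    if s ≠ 0 then altRuns rest (i + 1) (if start.isNone then some i else start) runs
    else
      match start with
      | some st => altRuns rest (i + 1) none (runs ++ [(i, i - st)])
      | none => altRuns rest (i + 1) none runs

-- pass 2 of Source B: emit centers for the runs, taken back-to-front
def altEmit (demask : Bool) : List (Int × Int) → List Int → List Int
  | [], out => out
  | (k, n) :: rs, out =>
    altEmit demask rs
      (if n ≤ 25 then out ++ [k - PySem.Int.floordiv n 2]
       else if demask then out ++ [k - n + 12, k - 12]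
       else out)

def detectAlg_alt (detectionVector : List Int) (demask : Bool) : List Int :=
  altEmit demask (altRuns detectionVector 0 none []).reverse []

-- ===== PRECONDITION & SPEC =====
def Spec_detectAlg (detectionVector : List Int) (demask : Bool) (out : List Int) : Prop := out = detectAlg_alt detectionVector demask
instance (detectionVector : List Int) (demask : Bool) (out : List Int) : Decidable (Spec_detectAlg detectionVector demask out) := by unfold Spec_detectAlg; infer_instance

-- ===== CLAIM (what is proved, stated in full; the proofs are below) =====
def Claim_equal_detectAlg : Prop := ∀ (detectionVector : List Int) (demask : Bool), Dom_detectAlg detectionVector demask → Spec_detectAlg detectionVector demask (detectAlg detectionVector demask)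

-- ===== LEMMAS AND PROOFS =====

-- what A appends for a terminated run (boundary k, length n)
def emitA (demask : Bool) (r : Int × Int) : List Int :=
  if r.2 ≤ 25 then [r.1 - Int.tdiv r.2 2]
  else if 25 < r.2 ∧ demask then [r.1 - 12, r.1 - r.2 + 12]
  else []

-- what B appends for such a run
def emitB (demask : Bool) (r : Int × Int) : List Int :=
  if r.2 ≤ 25 then [r.1 - PySem.Int.floordiv r.2 2]
  else if demask then [r.1 - r.2 + 12, r.1 - 12]
  else []

theorem altRuns_append : ∀ (rest : List Int) (i : Int) (st : Option Int) (runs : List (Int × Int)),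
    altRuns rest i st runs = runs ++ altRuns rest i st [] := by
  intro rest
  induction rest with
  | nil => intro i st runs; simp [altRuns]
  | cons s rest ih =>
    intro i st runs
    by_cases hs : s ≠ 0
    · simp [altRuns, hs]; rw [ih]
    · cases st with
      | none => simp [altRuns, hs]; rw [ih]
      | some st =>
        have e : ∀ rs, altRuns (s :: rest) i (some st) rs
            = altRuns rest (i + 1) none (rs ++ [(i, i - st)]) := by
          intro rs; simp [altRuns, hs]
        rw [e, e, List.nil_append, ih (i + 1) none (runs ++ [(i, i - st)]),
            ih (i + 1) none [(i, i - st)]]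
        simp

theorem altEmit_eq (demask : Bool) : ∀ (rs : List (Int × Int)) (out : List Int),
    altEmit demask rs out = out ++ rs.flatMap (emitB demask) := by
  intro rs
  induction rs with
  | nil => intro out; simp [altEmit]
  | cons r rs ih =>
    intro out
    obtain ⟨k, n⟩ := r
    rw [altEmit, ih, List.flatMap_cons, ← List.append_assoc]
    congr 1
    unfold emitB
    split_ifs <;> simp

theorem altRuns_pos : ∀ (rest : List Int) (i : Int) (st : Option Int) (runs : List (Int × Int)),
    (∀ r ∈ runs, 0 < r.2) → (∀ s0, st = some s0 → s0 < i) →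
    ∀ r ∈ altRuns rest i st runs, 0 < r.2 := by
  intro rest
  induction rest with
  | nil => intro i st runs h _ r hr; exact h r (by simpa [altRuns] using hr)
  | cons s rest ih =>
    intro i st runs hruns hst r hr
    by_cases hs : s ≠ 0
    · refine ih (i + 1) _ runs hruns ?_ r (by simpa [altRuns, hs] using hr)
      intro s0 h0
      cases st with
      | none => simp at h0; omega
      | some st0 => simp at h0; have := hst st0 rfl; omega
    · cases st with
      | none =>
        exact ih (i + 1) none runs hruns (by simp) r (by simpa [altRuns, hs] using hr)
      | some st0 =>
        refine ih (i + 1) none (runs ++ [(i, i - st0)]) ?_ (by simp) r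
          (by simpa [altRuns, hs] using hr)
        intro r' hr'
        rcases List.mem_append.1 hr' with h | h
        · exact hruns r' h
        · have := hst st0 rfl; simp at h; subst h; simp; omega

theorem aLoop_eq_runs (demask : Bool) : ∀ (rest : List Int) (i c : Int) (st : Option Int) (acc : List Int),
    ((st = none ∧ c = 0) ∨ (∃ s0, st = some s0 ∧ c = i - s0 ∧ s0 < i)) →
    aLoop demask rest i c acc = acc ++ (altRuns rest i st []).flatMap (emitA demask) := by
  intro rest
  induction rest with
  | nil => intro i c st acc _; simp [aLoop, altRuns]
  | cons s rest ih =>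
    intro i c st acc hrel
    by_cases hs : s ≠ 0
    · rw [aLoop, if_pos hs]
      rw [show altRuns (s :: rest) i st [] = altRuns rest (i + 1) (if st.isNone then some i else st) []
           from by simp [altRuns, hs]]
      apply ih
      rcases hrel with ⟨h1, h2⟩ | ⟨s0, h1, h2, h3⟩
      · exact Or.inr ⟨i, by simp [h1], by omega, by omega⟩
      · exact Or.inr ⟨s0, by simp [h1], by omega, by omega⟩
    · by_cases hc : c ≠ 0
      · rcases hrel with ⟨h1, h2⟩ | ⟨s0, h1, h2, h3⟩
        · omega
        · subst h1
          subst h2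
          rw [aLoop, if_neg hs, if_pos hc]
          rw [show altRuns (s :: rest) i (some s0) [] = altRuns rest (i + 1) none [(i, i - s0)]
               from by simp [altRuns, hs]]
          rw [altRuns_append, List.flatMap_append,
              ih (i + 1) 0 none _ (Or.inl ⟨rfl, rfl⟩)]
          unfold emitA
          simp only [List.flatMap_cons, List.flatMap_nil, List.append_nil]
          split_ifs <;> simp
      · rcases hrel with ⟨h1, h2⟩ | ⟨s0, h1, h2, h3⟩
        · subst h1
          rw [aLoop, if_neg hs, if_neg hc]
          rw [show altRuns (s :: rest) i none [] = altRuns rest (i + 1) none []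
               from by simp [altRuns, hs]]
          exact ih (i + 1) c none acc (Or.inl ⟨rfl, by omega⟩)
        · omega

theorem emitA_reverse (demask : Bool) (r : Int × Int) (hr : 0 < r.2) :
    (emitA demask r).reverse = emitB demask r := by
  obtain ⟨k, n⟩ := r
  simp only at hr
  unfold emitA emitB
  by_cases h25 : n ≤ 25
  · rw [if_pos h25, if_pos h25]
    have h1 : Int.tdiv n 2 = n / 2 := Int.tdiv_eq_ediv_of_nonneg (by omega)
    have h2 : PySem.Int.floordiv n 2 = n / 2 := PySem.Int.floordiv_eq_ediv_of_pos (by omega)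
    rw [h1, h2]; simp
  · rw [if_neg h25, if_neg h25]
    have h : 25 < n := by omega
    cases demask <;> simp [h]

theorem flatMap_congr_mem {α β : Type} (f g : α → List β) : ∀ (l : List α),
    (∀ x ∈ l, f x = g x) → l.flatMap f = l.flatMap g := by
  intro l
  induction l with
  | nil => intro _; rfl
  | cons x l ih =>
    intro h
    simp only [List.flatMap_cons, h x (by simp), ih fun y hy => h y (by simp [hy])]

-- ===== VERDICT (by name: the statement is the Claim_ definition above) =====
theorem detectAlg_spec : Claim_equal_detectAlg := by
  intro v demask _
  unfold Spec_detectAlg detectAlg detectAlg_alt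
  rw [aLoop_eq_runs demask v 0 0 none [] (Or.inl ⟨rfl, rfl⟩), altEmit_eq]
  simp only [List.nil_append, List.reverse_flatMap]
  apply flatMap_congr_mem
  intro r hr
  exact emitA_reverse demask r
    (altRuns_pos v 0 none [] (by simp) (by simp) r (List.mem_reverse.1 hr))
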